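-- pv_equiv track=rewrite | github.com/PAIPalooza/codeagent | backend/app/services/code_generation_service.py | _add_tailwind_classes
-- ===== SOURCE A (Python) =====
-- def _add_tailwind_classes(code: str) -> str:
--     """Add Tailwind CSS classes to components."""
--     # Simple replacements for common patterns
--     replacements = {
--         'className=""': 'className="p-4 bg-white rounded-lg shadow-md"',
--         'className="form"': 'className="space-y-4"',
--         'className="button"': 'className="px-4 py-2 bg-blue-500 text-white rounded hover:bg-blue-600"',
--         'className="input"': 'className="w-full px-3 py-2 border border-gray-300 rounded-md focus:outline-none focus:ring-2 focus:ring-blue-500"'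
--     }
--
--     result = code
--     for old, new in replacements.items():
--         result = result.replace(old, new)
--
--     return result
-- ===== SOURCE B (Python) =====
-- import re
--
-- _REPLACEMENTS = {
--     'className=""': 'className="p-4 bg-white rounded-lg shadow-md"',
--     'className="form"': 'className="space-y-4"',
--     'className="button"': 'className="px-4 py-2 bg-blue-500 text-white rounded hover:bg-blue-600"',
--     'className="input"': 'className="w-full px-3 py-2 border border-gray-300 rounded-md focus:outline-none focus:ring-2 focus:ring-blue-500"'
-- }
--
-- _PATTERN = re.compile('|'.join(map(re.escape, _REPLACEMENTS)))
--
--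
-- def _add_tailwind_classes(code: str) -> str:
--     """Add Tailwind CSS classes to components (single-pass substitution)."""
--     return _PATTERN.sub(lambda m: _REPLACEMENTS[m.group(0)], code)
-- ===== Notes on version B (the rewrite author's own statement) =====
-- stated objective: idiomatic
-- what changed: Replaces four sequential whole-string str.replace passes with one precompiled regex alternation (keys re.escape'd, joined by '|') substituted in a single left-to-right pass via a dict-lookup callback.
import Mathlib
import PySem

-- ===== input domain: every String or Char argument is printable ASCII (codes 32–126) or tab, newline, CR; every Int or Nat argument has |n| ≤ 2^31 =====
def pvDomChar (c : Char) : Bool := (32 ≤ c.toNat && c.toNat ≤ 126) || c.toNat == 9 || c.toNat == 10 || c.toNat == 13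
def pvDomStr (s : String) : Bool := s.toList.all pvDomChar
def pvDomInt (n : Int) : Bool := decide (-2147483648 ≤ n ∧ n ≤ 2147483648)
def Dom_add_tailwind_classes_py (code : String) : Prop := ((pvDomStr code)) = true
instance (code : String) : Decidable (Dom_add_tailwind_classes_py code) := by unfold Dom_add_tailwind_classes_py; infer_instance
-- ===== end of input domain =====

set_option maxRecDepth 10000
set_option maxHeartbeats 1000000


-- B replaces A's four sequential whole-string str.replace passes by ONE precompiled
-- regex alternation substituted in a single left-to-right pass (idiomatic; same result).

-- ===== PORT A =====
-- A: result = code; for old, new in replacements.items(): result = result.replace(old, new)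
def add_tailwind_classes_py (code : String) : String :=
  let replacements : List (String × String) :=
    [("className=\"\"", "className=\"p-4 bg-white rounded-lg shadow-md\""),
     ("className=\"form\"", "className=\"space-y-4\""),
     ("className=\"button\"", "className=\"px-4 py-2 bg-blue-500 text-white rounded hover:bg-blue-600\""),
     ("className=\"input\"", "className=\"w-full px-3 py-2 border border-gray-300 rounded-md focus:outline-none focus:ring-2 focus:ring-blue-500\"")]
  replacements.foldl (fun result on => PySem.Str.replace result on.1 on.2) code

-- ===== PORT B =====
-- the four (escaped) alternation branches of B's compiled pattern, in pattern order,
-- and the dict values B's callback looks up for each branch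
def pvPat1 : List Char := "className=\"\"".toList
def pvVal1 : List Char := "className=\"p-4 bg-white rounded-lg shadow-md\"".toList
def pvPat2 : List Char := "className=\"form\"".toList
def pvVal2 : List Char := "className=\"space-y-4\"".toList
def pvPat3 : List Char := "className=\"button\"".toList
def pvVal3 : List Char := "className=\"px-4 py-2 bg-blue-500 text-white rounded hover:bg-blue-600\"".toList
def pvPat4 : List Char := "className=\"input\"".toList
def pvVal4 : List Char := "className=\"w-full px-3 py-2 border border-gray-300 rounded-md focus:outline-none focus:ring-2 focus:ring-blue-500\"".toList

-- hand port of re.sub with a literal alternation pattern (no regex engine in Lean):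
-- exact for this pattern — at each position the branches are tried in pattern order
-- (leftmost match wins), a match emits its replacement and the scan resumes after it,
-- otherwise one character is copied.  Branch i has length |pvPatI|, hence the drops.
def pvScanB : List Char → List Char
  | [] => []
  | c :: t =>
    if pvPat1.isPrefixOf (c :: t) then pvVal1 ++ pvScanB (t.drop 11)
    else if pvPat2.isPrefixOf (c :: t) then pvVal2 ++ pvScanB (t.drop 15)
    else if pvPat3.isPrefixOf (c :: t) then pvVal3 ++ pvScanB (t.drop 17)
    else if pvPat4.isPrefixOf (c :: t) then pvVal4 ++ pvScanB (t.drop 16)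
    else c :: pvScanB t
  termination_by l => l.length
  decreasing_by all_goals (simp [List.length_drop]; try omega)

def add_tailwind_classes_py_alt (code : String) : String :=
  String.ofList (pvScanB code.toList)

-- ===== PRECONDITION & SPEC =====
def Spec_add_tailwind_classes_py (code : String) (out : String) : Prop := out = add_tailwind_classes_py_alt code
instance (code : String) (out : String) : Decidable (Spec_add_tailwind_classes_py code out) := by unfold Spec_add_tailwind_classes_py; infer_instance

-- ===== CLAIM (what is proved, stated in full; the proofs are below) =====
def Claim_equal_add_tailwind_classes_py : Prop := ∀ (code : String), Dom_add_tailwind_classes_py code → Spec_add_tailwind_classes_py code (add_tailwind_classes_py code)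

-- ===== LEMMAS AND PROOFS =====

-- direct-recursion reformulation of PySem.Chars.replace (for a nonempty pattern)
def pvRep (p v : List Char) : List Char → List Char
  | [] => []
  | c :: t =>
    if p.isPrefixOf (c :: t) then v ++ pvRep p v (t.drop (p.length - 1)) else c :: pvRep p v t
  termination_by l => l.length
  decreasing_by all_goals (simp [List.length_drop]; try omega)

lemma pvRep_nil (p v : List Char) : pvRep p v [] = [] := by simp [pvRep]

lemma pvRep_nomatch (p v : List Char) (c : Char) (t : List Char) (h : ¬ p <+: (c :: t)) :
    pvRep p v (c :: t) = c :: pvRep p v t := by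
  rw [pvRep, if_neg (by simpa [List.isPrefixOf_iff_prefix] using h)]

lemma pvRep_match (p v l : List Char) (hp : p ≠ []) (h : p <+: l) :
    pvRep p v l = v ++ pvRep p v (l.drop p.length) := by
  cases l with
  | nil => exact absurd (List.prefix_nil.mp h) hp
  | cons c t =>
    rw [pvRep, if_pos (List.isPrefixOf_iff_prefix.mpr h)]
    cases p with
    | nil => exact absurd rfl hp
    | cons q p' => simp [List.drop_succ_cons]

lemma pvGo_eq (p v : List Char) (hp : p ≠ []) :
    ∀ fuel l acc, l.length ≤ fuel →
      PySem.Chars.replace.go p v fuel l acc = acc.reverse ++ pvRep p v l := by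
  intro fuel
  induction fuel with
  | zero =>
    intro l acc hl
    have : l = [] := List.eq_nil_of_length_eq_zero (Nat.le_zero.mp hl)
    subst this
    simp [PySem.Chars.replace.go, pvRep_nil]
  | succ n ih =>
    intro l acc hl
    cases l with
    | nil => simp [PySem.Chars.replace.go, pvRep_nil]
    | cons c t =>
      by_cases hpre : p.isPrefixOf (c :: t) = true
      · rw [PySem.Chars.replace.go, if_pos hpre]
        have hpfx : p <+: (c :: t) := List.isPrefixOf_iff_prefix.mp hpre
        have hlen : ((c :: t).drop p.length).length ≤ n := by
          have hp1 : 1 ≤ p.length := by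
            cases p with | nil => exact absurd rfl hp | cons _ _ => simp
          simp only [List.length_drop, List.length_cons] at *
          omega
        rw [ih _ _ hlen, pvRep_match p v (c :: t) hp hpfx]
        simp
      · rw [PySem.Chars.replace.go, if_neg hpre]
        have hlen : t.length ≤ n := by simpa using hl
        rw [ih _ _ hlen, pvRep_nomatch p v c t (by simpa [List.isPrefixOf_iff_prefix] using hpre)]
        simp

lemma pvReplace_eq (p v l : List Char) (hp : p ≠ []) :
    PySem.Chars.replace l p v = pvRep p v l := by
  rw [PySem.Chars.replace, if_neg (by simpa [List.isEmpty_iff] using hp)]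
  simpa using pvGo_eq p v hp l.length l [] (le_refl _)

-- "no occurrence of p can start inside q, whatever follows q"
def pvBlocked (p q : List Char) : Bool :=
  (List.range q.length).all (fun i => !(p.isPrefixOf (q.drop i)) && !((q.drop i).isPrefixOf p))

lemma pvBlocked_no_prefix (p q t : List Char) (hb : pvBlocked p q = true)
    (i : Nat) (hi : i < q.length) : ¬ p <+: (q.drop i ++ t) := by
  intro h
  have hq : q.drop i <+: q.drop i ++ t := List.prefix_append _ _
  have := List.prefix_or_prefix_of_prefix h hq
  simp only [pvBlocked, List.all_eq_true, List.mem_range, Bool.and_eq_true,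
    Bool.not_eq_true'] at hb
  obtain ⟨h1, h2⟩ := hb i hi
  rcases this with h' | h'
  · exact absurd (List.isPrefixOf_iff_prefix.mpr h') (by simp [h1])
  · exact absurd (List.isPrefixOf_iff_prefix.mpr h') (by simp [h2])

lemma pvBlocked_tail (p : List Char) (a : Char) (q : List Char)
    (hb : pvBlocked p (a :: q) = true) : pvBlocked p q = true := by
  simp only [pvBlocked, List.all_eq_true, List.mem_range] at *
  intro i hi
  have := hb (i + 1) (by simpa using Nat.succ_lt_succ hi)
  simpa [List.drop_succ_cons] using this

lemma pvRep_pass (p v q t : List Char) (hb : pvBlocked p q = true) :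
    pvRep p v (q ++ t) = q ++ pvRep p v t := by
  induction q with
  | nil => rfl
  | cons a q' ih =>
    have hnp : ¬ p <+: (a :: q') ++ t := by
      simpa using pvBlocked_no_prefix p (a :: q') t hb 0 (by simp)
    rw [List.cons_append, pvRep_nomatch p v a (q' ++ t) (by simpa using hnp),
        ih (pvBlocked_tail p a q' hb)]
    simp

-- before the first occurrence of ch, pvRep copies its input (pattern and
-- replacement both START with ch, so any change introduces a ch)
lemma pvRep_take (p v : List Char) (ch : Char) (hp : p.head? = some ch) (hv : v.head? = some ch) :
    ∀ n t, t.length ≤ n → ∀ k, (∀ x ∈ (pvRep p v t).take k, x ≠ ch) →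
      (pvRep p v t).take k = t.take k := by
  intro n
  induction n with
  | zero =>
    intro t ht k _
    have : t = [] := List.eq_nil_of_length_eq_zero (Nat.le_zero.mp ht)
    subst this; simp [pvRep_nil]
  | succ m ih =>
    intro t ht k hk
    cases t with
    | nil => simp [pvRep_nil]
    | cons c t' =>
      have hpne : p ≠ [] := by intro h; subst h; simp at hp
      by_cases hpre : p <+: (c :: t')
      · rw [pvRep_match p v _ hpne hpre] at *
        cases k with
        | zero => simp
        | succ k' =>
          exfalso
          obtain ⟨vh, vt, rfl⟩ : ∃ vh vt, v = vh :: vt := by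
            cases v with | nil => simp at hv | cons a b => exact ⟨a, b, rfl⟩
          have hvh : vh = ch := by simpa using hv
          exact hk vh (by simp) hvh
      · rw [pvRep_nomatch p v c t' hpre] at *
        cases k with
        | zero => simp
        | succ k' =>
          have ht' : t'.length ≤ m := by simpa using ht
          have := ih t' ht' k' (fun x hx => hk x (by simpa using Or.inr hx))
          simp [List.take_succ_cons, this]

-- a ch-free prefix of pvRep's output was already a prefix of the input
lemma pvPrefix_back (p v : List Char) (ch : Char) (hp : p.head? = some ch) (hv : v.head? = some ch)
    (r : List Char) (hr : ∀ x ∈ r, x ≠ ch) (t : List Char) (h : r <+: pvRep p v t) :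
    r <+: t := by
  have htake : r = (pvRep p v t).take r.length := List.prefix_iff_eq_take.mp h
  have hch : ∀ x ∈ (pvRep p v t).take r.length, x ≠ ch := by rw [← htake]; exact hr
  have key := pvRep_take p v ch hp hv t.length t (le_refl _) r.length hch
  rw [htake, key]
  exact List.take_prefix _ _

-- unfolding lemmas for pvScanB
lemma pvScanB_nil : pvScanB [] = [] := by simp [pvScanB]

lemma pvScanB_m1 (l : List Char) (h1 : pvPat1 <+: l) :
    pvScanB l = pvVal1 ++ pvScanB (l.drop 12) := by
  cases l with
  | nil => exact absurd (List.prefix_nil.mp h1) (by decide)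
  | cons c t =>
    rw [pvScanB, if_pos (List.isPrefixOf_iff_prefix.mpr h1)]
    rfl

lemma pvScanB_m2 (l : List Char) (h1 : ¬ pvPat1 <+: l) (h2 : pvPat2 <+: l) :
    pvScanB l = pvVal2 ++ pvScanB (l.drop 16) := by
  cases l with
  | nil => exact absurd (List.prefix_nil.mp h2) (by decide)
  | cons c t =>
    rw [pvScanB, if_neg (by simpa [List.isPrefixOf_iff_prefix] using h1),
        if_pos (List.isPrefixOf_iff_prefix.mpr h2)]
    rfl

lemma pvScanB_m3 (l : List Char) (h1 : ¬ pvPat1 <+: l) (h2 : ¬ pvPat2 <+: l)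
    (h3 : pvPat3 <+: l) : pvScanB l = pvVal3 ++ pvScanB (l.drop 18) := by
  cases l with
  | nil => exact absurd (List.prefix_nil.mp h3) (by decide)
  | cons c t =>
    rw [pvScanB, if_neg (by simpa [List.isPrefixOf_iff_prefix] using h1),
        if_neg (by simpa [List.isPrefixOf_iff_prefix] using h2),
        if_pos (List.isPrefixOf_iff_prefix.mpr h3)]
    rfl

lemma pvScanB_m4 (l : List Char) (h1 : ¬ pvPat1 <+: l) (h2 : ¬ pvPat2 <+: l)
    (h3 : ¬ pvPat3 <+: l) (h4 : pvPat4 <+: l) :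
    pvScanB l = pvVal4 ++ pvScanB (l.drop 17) := by
  cases l with
  | nil => exact absurd (List.prefix_nil.mp h4) (by decide)
  | cons c t =>
    rw [pvScanB, if_neg (by simpa [List.isPrefixOf_iff_prefix] using h1),
        if_neg (by simpa [List.isPrefixOf_iff_prefix] using h2),
        if_neg (by simpa [List.isPrefixOf_iff_prefix] using h3),
        if_pos (List.isPrefixOf_iff_prefix.mpr h4)]
    rfl

lemma pvScanB_none (c : Char) (t : List Char) (h1 : ¬ pvPat1 <+: (c :: t))
    (h2 : ¬ pvPat2 <+: (c :: t)) (h3 : ¬ pvPat3 <+: (c :: t)) (h4 : ¬ pvPat4 <+: (c :: t)) :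
    pvScanB (c :: t) = c :: pvScanB t := by
  rw [pvScanB, if_neg (by simpa [List.isPrefixOf_iff_prefix] using h1),
      if_neg (by simpa [List.isPrefixOf_iff_prefix] using h2),
      if_neg (by simpa [List.isPrefixOf_iff_prefix] using h3),
      if_neg (by simpa [List.isPrefixOf_iff_prefix] using h4)]


lemma pvHead_p1 : pvPat1.head? = some 'c' := rfl
lemma pvHead_v1 : pvVal1.head? = some 'c' := rfl
lemma pvHead_p2 : pvPat2.head? = some 'c' := rfl
lemma pvHead_v2 : pvVal2.head? = some 'c' := rfl
lemma pvHead_p3 : pvPat3.head? = some 'c' := rfl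
lemma pvHead_v3 : pvVal3.head? = some 'c' := rfl
lemma pvTail2_free : ∀ x ∈ "lassName=\"form\"".toList, x ≠ 'c' := by
  have h : ("lassName=\"form\"".toList.all (fun x => x != 'c')) = true := rfl
  simpa using h
lemma pvTail3_free : ∀ x ∈ "lassName=\"button\"".toList, x ≠ 'c' := by
  have h : ("lassName=\"button\"".toList.all (fun x => x != 'c')) = true := rfl
  simpa using h
lemma pvTail4_free : ∀ x ∈ "lassName=\"input\"".toList, x ≠ 'c' := by
  have h : ("lassName=\"input\"".toList.all (fun x => x != 'c')) = true := rfl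
  simpa using h

-- A's four cascaded passes, on the char-list side
def pvChain (l : List Char) : List Char :=
  pvRep pvPat4 pvVal4 (pvRep pvPat3 pvVal3 (pvRep pvPat2 pvVal2 (pvRep pvPat1 pvVal1 l)))

lemma pvMain : ∀ n l, l.length ≤ n → pvScanB l = pvChain l := by
  intro n
  induction n with
  | zero =>
    intro l hl
    have : l = [] := List.eq_nil_of_length_eq_zero (Nat.le_zero.mp hl)
    subst this
    simp [pvScanB_nil, pvChain, pvRep_nil]
  | succ m ih =>
    intro l hl
    by_cases h1 : pvPat1 <+: l
    · obtain ⟨t, rfl⟩ := h1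
      have hdrop : (pvPat1 ++ t).drop 12 = t := List.drop_left (l₁ := pvPat1)
      rw [pvScanB_m1 _ (List.prefix_append _ _), hdrop]
      have hc : pvChain (pvPat1 ++ t) = pvVal1 ++ pvChain t := by
        rw [pvChain, pvChain,
            pvRep_match pvPat1 pvVal1 _ (by decide) (List.prefix_append _ _),
            List.drop_left (l₁ := pvPat1),
            pvRep_pass pvPat2 pvVal2 pvVal1 _ (by rfl),
            pvRep_pass pvPat3 pvVal3 pvVal1 _ (by rfl),
            pvRep_pass pvPat4 pvVal4 pvVal1 _ (by rfl)]
      rw [hc, ih t (by simp [pvPat1] at hl; omega)]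
    · by_cases h2 : pvPat2 <+: l
      · rw [pvScanB_m2 l h1 h2]
        obtain ⟨t, rfl⟩ := h2
        have hdrop : (pvPat2 ++ t).drop 16 = t := List.drop_left (l₁ := pvPat2)
        rw [hdrop]
        have hc : pvChain (pvPat2 ++ t) = pvVal2 ++ pvChain t := by
          rw [pvChain, pvChain,
              pvRep_pass pvPat1 pvVal1 pvPat2 _ (by rfl),
              pvRep_match pvPat2 pvVal2 _ (by decide) (List.prefix_append _ _),
              List.drop_left (l₁ := pvPat2),
              pvRep_pass pvPat3 pvVal3 pvVal2 _ (by rfl),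
              pvRep_pass pvPat4 pvVal4 pvVal2 _ (by rfl)]
        rw [hc, ih t (by simp [pvPat2] at hl; omega)]
      · by_cases h3 : pvPat3 <+: l
        · rw [pvScanB_m3 l h1 h2 h3]
          obtain ⟨t, rfl⟩ := h3
          have hdrop : (pvPat3 ++ t).drop 18 = t := List.drop_left (l₁ := pvPat3)
          rw [hdrop]
          have hc : pvChain (pvPat3 ++ t) = pvVal3 ++ pvChain t := by
            rw [pvChain, pvChain,
                pvRep_pass pvPat1 pvVal1 pvPat3 _ (by rfl),
                pvRep_pass pvPat2 pvVal2 pvPat3 _ (by rfl),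
                pvRep_match pvPat3 pvVal3 _ (by decide) (List.prefix_append _ _),
                List.drop_left (l₁ := pvPat3),
                pvRep_pass pvPat4 pvVal4 pvVal3 _ (by rfl)]
          rw [hc, ih t (by simp [pvPat3] at hl; omega)]
        · by_cases h4 : pvPat4 <+: l
          · rw [pvScanB_m4 l h1 h2 h3 h4]
            obtain ⟨t, rfl⟩ := h4
            have hdrop : (pvPat4 ++ t).drop 17 = t := List.drop_left (l₁ := pvPat4)
            rw [hdrop]
            have hc : pvChain (pvPat4 ++ t) = pvVal4 ++ pvChain t := by
              rw [pvChain, pvChain,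
                  pvRep_pass pvPat1 pvVal1 pvPat4 _ (by rfl),
                  pvRep_pass pvPat2 pvVal2 pvPat4 _ (by rfl),
                  pvRep_pass pvPat3 pvVal3 pvPat4 _ (by rfl),
                  pvRep_match pvPat4 pvVal4 _ (by decide) (List.prefix_append _ _),
                  List.drop_left (l₁ := pvPat4)]
            rw [hc, ih t (by simp [pvPat4] at hl; omega)]
          · cases l with
            | nil => simp [pvScanB_nil, pvChain, pvRep_nil]
            | cons c t =>
              -- no branch matches here; each cascaded pass also just copies c,
              -- because a later pattern matching the REWRITTEN tail would have
              -- to match the original tail (pvPrefix_back: its tail is 'c'-free)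
              rw [pvScanB_none c t h1 h2 h3 h4]
              have e1 : pvRep pvPat1 pvVal1 (c :: t) = c :: pvRep pvPat1 pvVal1 t :=
                pvRep_nomatch _ _ _ _ h1
              have hn2 : ¬ pvPat2 <+: (c :: pvRep pvPat1 pvVal1 t) := by
                intro h
                rw [show pvPat2 = 'c' :: "lassName=\"form\"".toList by rfl,
                    List.cons_prefix_cons] at h
                obtain ⟨hc, hr⟩ := h
                have := pvPrefix_back pvPat1 pvVal1 'c' pvHead_p1 pvHead_v1
                  _ pvTail2_free t hr
                exact h2 (by
                  rw [show pvPat2 = 'c' :: "lassName=\"form\"".toList by rfl,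
                      List.cons_prefix_cons]
                  exact ⟨hc, this⟩)
              have e2 : pvRep pvPat2 pvVal2 (c :: pvRep pvPat1 pvVal1 t)
                  = c :: pvRep pvPat2 pvVal2 (pvRep pvPat1 pvVal1 t) :=
                pvRep_nomatch _ _ _ _ hn2
              have hn3 : ¬ pvPat3 <+: (c :: pvRep pvPat2 pvVal2 (pvRep pvPat1 pvVal1 t)) := by
                intro h
                rw [show pvPat3 = 'c' :: "lassName=\"button\"".toList by rfl,
                    List.cons_prefix_cons] at h
                obtain ⟨hc, hr⟩ := h
                have s2 := pvPrefix_back pvPat2 pvVal2 'c' pvHead_p2 pvHead_v2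
                  _ pvTail3_free _ hr
                have s1 := pvPrefix_back pvPat1 pvVal1 'c' pvHead_p1 pvHead_v1
                  _ pvTail3_free t s2
                exact h3 (by
                  rw [show pvPat3 = 'c' :: "lassName=\"button\"".toList by rfl,
                      List.cons_prefix_cons]
                  exact ⟨hc, s1⟩)
              have e3 : pvRep pvPat3 pvVal3 (c :: pvRep pvPat2 pvVal2 (pvRep pvPat1 pvVal1 t))
                  = c :: pvRep pvPat3 pvVal3 (pvRep pvPat2 pvVal2 (pvRep pvPat1 pvVal1 t)) :=
                pvRep_nomatch _ _ _ _ hn3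
              have hn4 : ¬ pvPat4 <+:
                  (c :: pvRep pvPat3 pvVal3 (pvRep pvPat2 pvVal2 (pvRep pvPat1 pvVal1 t))) := by
                intro h
                rw [show pvPat4 = 'c' :: "lassName=\"input\"".toList by rfl,
                    List.cons_prefix_cons] at h
                obtain ⟨hc, hr⟩ := h
                have s3 := pvPrefix_back pvPat3 pvVal3 'c' pvHead_p3 pvHead_v3
                  _ pvTail4_free _ hr
                have s2 := pvPrefix_back pvPat2 pvVal2 'c' pvHead_p2 pvHead_v2
                  _ pvTail4_free _ s3
                have s1 := pvPrefix_back pvPat1 pvVal1 'c' pvHead_p1 pvHead_v1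
                  _ pvTail4_free t s2
                exact h4 (by
                  rw [show pvPat4 = 'c' :: "lassName=\"input\"".toList by rfl,
                      List.cons_prefix_cons]
                  exact ⟨hc, s1⟩)
              have e4 : pvRep pvPat4 pvVal4
                    (c :: pvRep pvPat3 pvVal3 (pvRep pvPat2 pvVal2 (pvRep pvPat1 pvVal1 t)))
                  = c :: pvRep pvPat4 pvVal4
                    (pvRep pvPat3 pvVal3 (pvRep pvPat2 pvVal2 (pvRep pvPat1 pvVal1 t))) :=
                pvRep_nomatch _ _ _ _ hn4
              show c :: pvScanB t = pvChain (c :: t)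
              unfold pvChain
              rw [e1, e2, e3, e4, ih t (by simpa using hl)]
              rfl

lemma pvPortA_eq (code : String) :
    add_tailwind_classes_py code = String.ofList (pvChain code.toList) := by
  simp only [add_tailwind_classes_py, List.foldl, PySem.Str.replace, String.toList_ofList]
  rw [pvReplace_eq _ _ _ (by decide), pvReplace_eq _ _ _ (by decide),
      pvReplace_eq _ _ _ (by decide), pvReplace_eq _ _ _ (by decide)]
  rfl

-- ===== VERDICT (by name: the statement is the Claim_ definition above) =====
theorem add_tailwind_classes_py_spec : Claim_equal_add_tailwind_classes_py := by
  intro code _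
  unfold Spec_add_tailwind_classes_py add_tailwind_classes_py_alt
  rw [pvPortA_eq, pvMain code.toList.length code.toList (le_refl _)]
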